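-- pv_equiv track=rewrite | github.com/textolytics/rf_env | lib/python3.13/site-packages/robotmcp/components/execution/locator_converter.py | _has_explicit_strategy
-- ===== SOURCE A (Python) =====
-- def _has_explicit_strategy(locator: str) -> bool:
--     """Check if locator already has an explicit strategy prefix."""
--     # Browser Library strategies (strategy=value)
--     browser_strategies = ['id=', 'css=', 'xpath=', 'text=']
--
--     # SeleniumLibrary strategies (strategy:value or strategy=value)
--     selenium_strategies = ['id:', 'name:', 'identifier:', 'class:', 'tag:',
--                          'xpath:', 'css:', 'dom:', 'link:', 'partial link:',
--                          'data:', 'jquery:', 'default:']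
--
--     all_strategies = browser_strategies + selenium_strategies + \
--                     [s.replace(':', '=') for s in selenium_strategies if ':' in s]
--
--     return any(locator.startswith(strategy) for strategy in all_strategies)
-- ===== SOURCE B (Python) =====
-- _SELENIUM_NAMES = frozenset({
--     'id', 'name', 'identifier', 'class', 'tag', 'xpath', 'css',
--     'dom', 'link', 'partial link', 'data', 'jquery', 'default',
-- })
--
--
-- def _has_explicit_strategy(locator: str) -> bool:
--     """Check if locator already has an explicit strategy prefix."""
--     i = locator.find(':')
--     j = locator.find('=')
--     if i == -1 and j == -1:
--         return False
--     if j == -1 or (i != -1 and i < j):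
--         return locator[:i] in _SELENIUM_NAMES
--     return locator[:j] in _SELENIUM_NAMES or locator[:j] == 'text'
-- ===== Notes on version B (the rewrite author's own statement) =====
-- stated objective: idiomatic
-- what changed: Instead of testing the locator against a generated list of ~30 strategy prefixes one by one, B locates the first delimiter character (colon or equals sign) and does a single membership test of the name before it against a frozenset of strategy names.
import Mathlib
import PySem

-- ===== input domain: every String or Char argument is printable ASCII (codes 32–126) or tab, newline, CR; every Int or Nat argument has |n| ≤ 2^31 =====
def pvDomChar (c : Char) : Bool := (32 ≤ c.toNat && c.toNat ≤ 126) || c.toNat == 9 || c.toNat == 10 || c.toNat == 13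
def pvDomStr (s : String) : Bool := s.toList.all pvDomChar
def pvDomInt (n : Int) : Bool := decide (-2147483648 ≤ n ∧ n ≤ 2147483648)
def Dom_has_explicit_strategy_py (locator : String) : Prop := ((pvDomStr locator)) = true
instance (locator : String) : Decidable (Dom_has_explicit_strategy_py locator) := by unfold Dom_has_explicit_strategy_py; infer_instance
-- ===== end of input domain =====

-- B replaces A's scan over ~30 string prefixes by locating the first ':'/'=' delimiter and one
-- set-membership test on the name before it (objective: idiomatic; no speed claim).

-- ===== PORT A =====
def has_explicit_strategy_py (locator : String) : Bool :=
  let browser_strategies : List String := ["id=", "css=", "xpath=", "text="]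
  let selenium_strategies : List String :=
    ["id:", "name:", "identifier:", "class:", "tag:",
     "xpath:", "css:", "dom:", "link:", "partial link:",
     "data:", "jquery:", "default:"]
  let all_strategies := browser_strategies ++ selenium_strategies ++
    ((selenium_strategies.filter (fun s => PySem.Str.isIn ":" s)).map
      (fun s => PySem.Str.replace s ":" "="))
  all_strategies.any (fun strategy => PySem.Str.startswith locator strategy)

-- ===== PORT B =====
-- the frozenset _SELENIUM_NAMES of Source B
def pvSelNames : PySem.Set String :=
  PySem.Set.ofList
    ["id", "name", "identifier", "class", "tag", "xpath", "css",
     "dom", "link", "partial link", "data", "jquery", "default"]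

def has_explicit_strategy_py_alt (locator : String) : Bool :=
  let i := PySem.Str.find locator ":"
  let j := PySem.Str.find locator "="
  if i = -1 ∧ j = -1 then
    false
  else if j = -1 ∨ (i ≠ -1 ∧ i < j) then
    pvSelNames.contains (PySem.Str.slice locator none (some i))
  else
    pvSelNames.contains (PySem.Str.slice locator none (some j)) ||
      (PySem.Str.slice locator none (some j) == "text")

-- ===== PRECONDITION & SPEC =====
def Spec_has_explicit_strategy_py (locator : String) (out : Bool) : Prop := out = has_explicit_strategy_py_alt locator
instance (locator : String) (out : Bool) : Decidable (Spec_has_explicit_strategy_py locator out) := by unfold Spec_has_explicit_strategy_py; infer_instance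

-- ===== CLAIM (what is proved, stated in full; the proofs are below) =====
def Claim_equal_has_explicit_strategy_py : Prop := ∀ (locator : String), Dom_has_explicit_strategy_py locator → Spec_has_explicit_strategy_py locator (has_explicit_strategy_py locator)

-- ===== LEMMAS AND PROOFS =====

-- A's prefix list, flattened (browser ++ selenium ++ '='-variants of selenium)
def pfxA : List String :=
  ["id=", "css=", "xpath=", "text=",
   "id:", "name:", "identifier:", "class:", "tag:", "xpath:", "css:", "dom:",
   "link:", "partial link:", "data:", "jquery:", "default:",
   "id=", "name=", "identifier=", "class=", "tag=", "xpath=", "css=", "dom=",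
   "link=", "partial link=", "data=", "jquery=", "default="]

lemma A_eq (locator : String) :
    has_explicit_strategy_py locator = pfxA.any (fun p => PySem.Str.startswith locator p) := rfl


-- first occurrence of d in name ++ d :: rest is at |name| when d is not in name
lemma find_char_eq_length (name rest : List Char) (d : Char) (hd : d ∉ name) :
    PySem.Chars.find (name ++ d :: rest) [d] = (name.length : Int) := by
  have hinf : [d] <:+: name ++ d :: rest := ⟨name, rest, by simp⟩
  have hnn : 0 ≤ PySem.Chars.find (name ++ d :: rest) [d] :=
    (PySem.Chars.find_nonneg_iff _ _).mpr hinf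
  obtain ⟨hpre, hmin⟩ := PySem.Chars.find_spec hnn
  set f := (PySem.Chars.find (name ++ d :: rest) [d]).toNat with hf
  have hat : [d] <+: (name ++ d :: rest).drop name.length := by
    rw [List.drop_left]; exact ⟨rest, rfl⟩
  have hle : f ≤ name.length := by
    by_contra hlt
    exact hmin name.length (by omega) hat
  have hget : (name ++ d :: rest)[f]? = some d := by
    obtain ⟨t, ht⟩ := hpre
    rw [← List.head?_drop, ← ht]; rfl
  have hnlt : ¬ f < name.length := by
    intro hflt
    rw [List.getElem?_append_left hflt] at hget
    exact hd (List.mem_of_getElem? hget)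
  have : f = name.length := le_antisymm hle (le_of_not_gt hnlt)
  omega

-- a char absent from name and different from d occurs (if at all) only after position |name|
lemma find_char_gt (name rest : List Char) (c d : Char) (hc : c ∉ name) (hne : c ≠ d) :
    PySem.Chars.find (name ++ d :: rest) [c] = -1 ∨
      (name.length : Int) < PySem.Chars.find (name ++ d :: rest) [c] := by
  by_cases h : PySem.Chars.find (name ++ d :: rest) [c] = -1
  · exact Or.inl h
  right
  have hnn : 0 ≤ PySem.Chars.find (name ++ d :: rest) [c] := by
    have := PySem.Chars.neg_one_le_find (name ++ d :: rest) [c]; omega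
  obtain ⟨hpre, -⟩ := PySem.Chars.find_spec hnn
  set f := (PySem.Chars.find (name ++ d :: rest) [c]).toNat with hf
  have hget : (name ++ d :: rest)[f]? = some c := by
    obtain ⟨t, ht⟩ := hpre
    rw [← List.head?_drop, ← ht]; rfl
  have : name.length < f := by
    rcases lt_trichotomy f name.length with hlt | heq | hgt
    · rw [List.getElem?_append_left hlt] at hget
      exact absurd (List.mem_of_getElem? hget) hc
    · rw [heq] at hget
      rw [List.getElem?_append_right (le_refl _)] at hget
      simp at hget
      exact absurd hget.symm hne
    · exact hgt
  omega

-- a nonnegative find result splits the list at the found char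
lemma shape_of_find (L : List Char) (c : Char) (h : 0 ≤ PySem.Chars.find L [c]) :
    ∃ rest, L = L.take (PySem.Chars.find L [c]).toNat ++ c :: rest := by
  obtain ⟨hpre, -⟩ := PySem.Chars.find_spec h
  obtain ⟨t, ht⟩ := hpre
  refine ⟨t, ?_⟩
  conv_lhs => rw [← List.take_append_drop (PySem.Chars.find L [c]).toNat L]
  rw [← ht]
  rfl

lemma shape_of_startswith (l p : String) (name : List Char) (d : Char)
    (hp : p.toList = name ++ [d]) (h : PySem.Str.startswith l p = true) :
    ∃ rest, l.toList = name ++ d :: rest := by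
  rw [PySem.Str.startswith_eq, PySem.Chars.startswith_iff, hp] at h
  obtain ⟨t, ht⟩ := h
  exact ⟨t, by rw [← ht]; simp⟩

lemma startswith_of_shape (l : String) (name rest : List Char) (d : Char)
    (hL : l.toList = name ++ d :: rest) (p : String) (hp : p.toList = name ++ [d]) :
    PySem.Str.startswith l p = true := by
  rw [PySem.Str.startswith_eq, PySem.Chars.startswith_iff, hp, hL]
  exact ⟨rest, by simp⟩

lemma A_true (l p : String) (hp : p ∈ pfxA) (h : PySem.Str.startswith l p = true) :
    has_explicit_strategy_py l = true := by
  rw [A_eq]; exact List.any_eq_true.mpr ⟨p, hp, h⟩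

lemma B_true_of_colon (l name : String) (rest : List Char)
    (hL : l.toList = name.toList ++ ':' :: rest)
    (h1 : ':' ∉ name.toList) (h2 : '=' ∉ name.toList)
    (hmem : pvSelNames.contains name = true) :
    has_explicit_strategy_py_alt l = true := by
  have hfc : PySem.Str.find l ":" = (name.toList.length : Int) := by
    rw [PySem.Str.find_eq]
    have hc : (":" : String).toList = [':'] := by decide
    rw [hc, hL]
    exact find_char_eq_length _ _ _ h1
  have hfe : PySem.Str.find l "=" = -1 ∨ (name.toList.length : Int) < PySem.Str.find l "=" := by
    rw [PySem.Str.find_eq]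
    have hc : ("=" : String).toList = ['='] := by decide
    rw [hc, hL]
    exact find_char_gt _ _ _ _ h2 (by decide)
  have hslice : PySem.Str.slice l none (some (PySem.Str.find l ":")) = name := by
    rw [← String.toList_inj, PySem.Str.toList_slice, PySem.Chars.slice_eq_listSlice, hfc,
        PySem.List.slice_to _ (by positivity), Int.toNat_natCast, hL, List.take_left]
  simp only [has_explicit_strategy_py_alt]
  rw [if_neg, if_pos]
  · rw [hslice]; exact hmem
  · rcases hfe with h | h
    · exact Or.inl h
    · exact Or.inr ⟨by rw [hfc]; omega, by rw [hfc]; omega⟩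
  · rintro ⟨hi, -⟩
    rw [hfc] at hi
    omega

lemma B_true_of_eq (l name : String) (rest : List Char)
    (hL : l.toList = name.toList ++ '=' :: rest)
    (h1 : ':' ∉ name.toList) (h2 : '=' ∉ name.toList)
    (hmem : (pvSelNames.contains name || name == "text") = true) :
    has_explicit_strategy_py_alt l = true := by
  have hfe : PySem.Str.find l "=" = (name.toList.length : Int) := by
    rw [PySem.Str.find_eq]
    have hc : ("=" : String).toList = ['='] := by decide
    rw [hc, hL]
    exact find_char_eq_length _ _ _ h2
  have hfc : PySem.Str.find l ":" = -1 ∨ (name.toList.length : Int) < PySem.Str.find l ":" := by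
    rw [PySem.Str.find_eq]
    have hc : (":" : String).toList = [':'] := by decide
    rw [hc, hL]
    exact find_char_gt _ _ _ _ h1 (by decide)
  have hslice : PySem.Str.slice l none (some (PySem.Str.find l "=")) = name := by
    rw [← String.toList_inj, PySem.Str.toList_slice, PySem.Chars.slice_eq_listSlice, hfe,
        PySem.List.slice_to _ (by positivity), Int.toNat_natCast, hL, List.take_left]
  simp only [has_explicit_strategy_py_alt]
  rw [if_neg, if_neg]
  · rw [hslice]; exact hmem
  · rintro (hj | ⟨hi, hij⟩)
    · rw [hfe] at hj; omega
    · rcases hfc with h | h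
      · exact hi h
      · rw [hfe] at hij; omega
  · rintro ⟨-, hj⟩
    rw [hfe] at hj
    omega

lemma AtoB (l : String) (hA : has_explicit_strategy_py l = true) :
    has_explicit_strategy_py_alt l = true := by
  rw [A_eq] at hA
  obtain ⟨p, hp, hs⟩ := List.any_eq_true.mp hA
  simp only [pfxA, List.mem_cons, List.not_mem_nil, or_false] at hp
  rcases hp with rfl | rfl | rfl | rfl | rfl | rfl | rfl | rfl | rfl | rfl | rfl | rfl | rfl | rfl | rfl | rfl | rfl | rfl | rfl | rfl | rfl | rfl | rfl | rfl | rfl | rfl | rfl | rfl | rfl | rfl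
  · obtain ⟨rest, hL⟩ := shape_of_startswith l "id=" "id".toList '=' (by decide) hs
    exact B_true_of_eq l "id" rest hL (by decide) (by decide) (by decide)
  · obtain ⟨rest, hL⟩ := shape_of_startswith l "css=" "css".toList '=' (by decide) hs
    exact B_true_of_eq l "css" rest hL (by decide) (by decide) (by decide)
  · obtain ⟨rest, hL⟩ := shape_of_startswith l "xpath=" "xpath".toList '=' (by decide) hs
    exact B_true_of_eq l "xpath" rest hL (by decide) (by decide) (by decide)
  · obtain ⟨rest, hL⟩ := shape_of_startswith l "text=" "text".toList '=' (by decide) hs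
    exact B_true_of_eq l "text" rest hL (by decide) (by decide) (by decide)
  · obtain ⟨rest, hL⟩ := shape_of_startswith l "id:" "id".toList ':' (by decide) hs
    exact B_true_of_colon l "id" rest hL (by decide) (by decide) (by decide)
  · obtain ⟨rest, hL⟩ := shape_of_startswith l "name:" "name".toList ':' (by decide) hs
    exact B_true_of_colon l "name" rest hL (by decide) (by decide) (by decide)
  · obtain ⟨rest, hL⟩ := shape_of_startswith l "identifier:" "identifier".toList ':' (by decide) hs
    exact B_true_of_colon l "identifier" rest hL (by decide) (by decide) (by decide)
  · obtain ⟨rest, hL⟩ := shape_of_startswith l "class:" "class".toList ':' (by decide) hs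
    exact B_true_of_colon l "class" rest hL (by decide) (by decide) (by decide)
  · obtain ⟨rest, hL⟩ := shape_of_startswith l "tag:" "tag".toList ':' (by decide) hs
    exact B_true_of_colon l "tag" rest hL (by decide) (by decide) (by decide)
  · obtain ⟨rest, hL⟩ := shape_of_startswith l "xpath:" "xpath".toList ':' (by decide) hs
    exact B_true_of_colon l "xpath" rest hL (by decide) (by decide) (by decide)
  · obtain ⟨rest, hL⟩ := shape_of_startswith l "css:" "css".toList ':' (by decide) hs
    exact B_true_of_colon l "css" rest hL (by decide) (by decide) (by decide)
  · obtain ⟨rest, hL⟩ := shape_of_startswith l "dom:" "dom".toList ':' (by decide) hs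
    exact B_true_of_colon l "dom" rest hL (by decide) (by decide) (by decide)
  · obtain ⟨rest, hL⟩ := shape_of_startswith l "link:" "link".toList ':' (by decide) hs
    exact B_true_of_colon l "link" rest hL (by decide) (by decide) (by decide)
  · obtain ⟨rest, hL⟩ := shape_of_startswith l "partial link:" "partial link".toList ':' (by decide) hs
    exact B_true_of_colon l "partial link" rest hL (by decide) (by decide) (by decide)
  · obtain ⟨rest, hL⟩ := shape_of_startswith l "data:" "data".toList ':' (by decide) hs
    exact B_true_of_colon l "data" rest hL (by decide) (by decide) (by decide)
  · obtain ⟨rest, hL⟩ := shape_of_startswith l "jquery:" "jquery".toList ':' (by decide) hs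
    exact B_true_of_colon l "jquery" rest hL (by decide) (by decide) (by decide)
  · obtain ⟨rest, hL⟩ := shape_of_startswith l "default:" "default".toList ':' (by decide) hs
    exact B_true_of_colon l "default" rest hL (by decide) (by decide) (by decide)
  · obtain ⟨rest, hL⟩ := shape_of_startswith l "id=" "id".toList '=' (by decide) hs
    exact B_true_of_eq l "id" rest hL (by decide) (by decide) (by decide)
  · obtain ⟨rest, hL⟩ := shape_of_startswith l "name=" "name".toList '=' (by decide) hs
    exact B_true_of_eq l "name" rest hL (by decide) (by decide) (by decide)
  · obtain ⟨rest, hL⟩ := shape_of_startswith l "identifier=" "identifier".toList '=' (by decide) hs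
    exact B_true_of_eq l "identifier" rest hL (by decide) (by decide) (by decide)
  · obtain ⟨rest, hL⟩ := shape_of_startswith l "class=" "class".toList '=' (by decide) hs
    exact B_true_of_eq l "class" rest hL (by decide) (by decide) (by decide)
  · obtain ⟨rest, hL⟩ := shape_of_startswith l "tag=" "tag".toList '=' (by decide) hs
    exact B_true_of_eq l "tag" rest hL (by decide) (by decide) (by decide)
  · obtain ⟨rest, hL⟩ := shape_of_startswith l "xpath=" "xpath".toList '=' (by decide) hs
    exact B_true_of_eq l "xpath" rest hL (by decide) (by decide) (by decide)
  · obtain ⟨rest, hL⟩ := shape_of_startswith l "css=" "css".toList '=' (by decide) hs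
    exact B_true_of_eq l "css" rest hL (by decide) (by decide) (by decide)
  · obtain ⟨rest, hL⟩ := shape_of_startswith l "dom=" "dom".toList '=' (by decide) hs
    exact B_true_of_eq l "dom" rest hL (by decide) (by decide) (by decide)
  · obtain ⟨rest, hL⟩ := shape_of_startswith l "link=" "link".toList '=' (by decide) hs
    exact B_true_of_eq l "link" rest hL (by decide) (by decide) (by decide)
  · obtain ⟨rest, hL⟩ := shape_of_startswith l "partial link=" "partial link".toList '=' (by decide) hs
    exact B_true_of_eq l "partial link" rest hL (by decide) (by decide) (by decide)
  · obtain ⟨rest, hL⟩ := shape_of_startswith l "data=" "data".toList '=' (by decide) hs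
    exact B_true_of_eq l "data" rest hL (by decide) (by decide) (by decide)
  · obtain ⟨rest, hL⟩ := shape_of_startswith l "jquery=" "jquery".toList '=' (by decide) hs
    exact B_true_of_eq l "jquery" rest hL (by decide) (by decide) (by decide)
  · obtain ⟨rest, hL⟩ := shape_of_startswith l "default=" "default".toList '=' (by decide) hs
    exact B_true_of_eq l "default" rest hL (by decide) (by decide) (by decide)

lemma mem_pvSelNames (s : String) (h : pvSelNames.contains s = true) :
    s = "id" ∨ s = "name" ∨ s = "identifier" ∨ s = "class" ∨ s = "tag" ∨ s = "xpath" ∨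
    s = "css" ∨ s = "dom" ∨ s = "link" ∨ s = "partial link" ∨ s = "data" ∨ s = "jquery" ∨
    s = "default" := by
  have hset : pvSelNames = ["id", "name", "identifier", "class", "tag", "xpath", "css",
      "dom", "link", "partial link", "data", "jquery", "default"] := by rfl
  rw [hset] at h
  simpa using h

lemma BtoA (l : String) (hB : has_explicit_strategy_py_alt l = true) :
    has_explicit_strategy_py l = true := by
  simp only [has_explicit_strategy_py_alt] at hB
  by_cases hc1 : PySem.Str.find l ":" = -1 ∧ PySem.Str.find l "=" = -1
  · rw [if_pos hc1] at hB
    cases hB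
  by_cases hc2 : PySem.Str.find l "=" = -1 ∨
      (PySem.Str.find l ":" ≠ -1 ∧ PySem.Str.find l ":" < PySem.Str.find l "=")
  · -- colon branch
    rw [if_neg hc1, if_pos hc2] at hB
    have hi : 0 ≤ PySem.Chars.find l.toList [':'] := by
      have hne : PySem.Str.find l ":" ≠ -1 := by
        rcases hc2 with hj | ⟨hi', -⟩
        · intro h; exact hc1 ⟨h, hj⟩
        · exact hi'
      have h0 := PySem.Chars.neg_one_le_find l.toList [':']
      rw [PySem.Str.find_eq] at hne
      have hcol : (":" : String).toList = [':'] := by decide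
      rw [hcol] at hne
      omega
    obtain ⟨rest, hL⟩ := shape_of_find l.toList ':' hi
    have hstl : (PySem.Str.slice l none (some (PySem.Str.find l ":"))).toList =
        l.toList.take (PySem.Chars.find l.toList [':']).toNat := by
      rw [PySem.Str.toList_slice, PySem.Chars.slice_eq_listSlice, PySem.Str.find_eq]
      have hcol : (":" : String).toList = [':'] := by decide
      rw [hcol, PySem.List.slice_to _ hi]
    set s := PySem.Str.slice l none (some (PySem.Str.find l ":")) with hsdef
    rw [← hstl] at hL
    clear_value s
    rcases mem_pvSelNames s hB with hs | hs | hs | hs | hs | hs | hs | hs | hs | hs | hs | hs | hs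
    · rw [hs] at hL
      exact A_true l "id:" (by decide) (startswith_of_shape l "id".toList rest ':' hL _ (by decide))
    · rw [hs] at hL
      exact A_true l "name:" (by decide) (startswith_of_shape l "name".toList rest ':' hL _ (by decide))
    · rw [hs] at hL
      exact A_true l "identifier:" (by decide) (startswith_of_shape l "identifier".toList rest ':' hL _ (by decide))
    · rw [hs] at hL
      exact A_true l "class:" (by decide) (startswith_of_shape l "class".toList rest ':' hL _ (by decide))
    · rw [hs] at hL
      exact A_true l "tag:" (by decide) (startswith_of_shape l "tag".toList rest ':' hL _ (by decide))
    · rw [hs] at hL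
      exact A_true l "xpath:" (by decide) (startswith_of_shape l "xpath".toList rest ':' hL _ (by decide))
    · rw [hs] at hL
      exact A_true l "css:" (by decide) (startswith_of_shape l "css".toList rest ':' hL _ (by decide))
    · rw [hs] at hL
      exact A_true l "dom:" (by decide) (startswith_of_shape l "dom".toList rest ':' hL _ (by decide))
    · rw [hs] at hL
      exact A_true l "link:" (by decide) (startswith_of_shape l "link".toList rest ':' hL _ (by decide))
    · rw [hs] at hL
      exact A_true l "partial link:" (by decide) (startswith_of_shape l "partial link".toList rest ':' hL _ (by decide))
    · rw [hs] at hL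
      exact A_true l "data:" (by decide) (startswith_of_shape l "data".toList rest ':' hL _ (by decide))
    · rw [hs] at hL
      exact A_true l "jquery:" (by decide) (startswith_of_shape l "jquery".toList rest ':' hL _ (by decide))
    · rw [hs] at hL
      exact A_true l "default:" (by decide) (startswith_of_shape l "default".toList rest ':' hL _ (by decide))
  · -- eq branch
    rw [if_neg hc1, if_neg hc2] at hB
    have hj : 0 ≤ PySem.Chars.find l.toList ['='] := by
      have hne : PySem.Str.find l "=" ≠ -1 := fun h => hc2 (Or.inl h)
      have h0 := PySem.Chars.neg_one_le_find l.toList ['=']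
      rw [PySem.Str.find_eq] at hne
      have heqc : ("=" : String).toList = ['='] := by decide
      rw [heqc] at hne
      omega
    obtain ⟨rest, hL⟩ := shape_of_find l.toList '=' hj
    have hstl : (PySem.Str.slice l none (some (PySem.Str.find l "="))).toList =
        l.toList.take (PySem.Chars.find l.toList ['=']).toNat := by
      rw [PySem.Str.toList_slice, PySem.Chars.slice_eq_listSlice, PySem.Str.find_eq]
      have heqc : ("=" : String).toList = ['='] := by decide
      rw [heqc, PySem.List.slice_to _ hj]
    set s := PySem.Str.slice l none (some (PySem.Str.find l "=")) with hsdef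
    rw [← hstl] at hL
    clear_value s
    rw [Bool.or_eq_true] at hB
    rcases hB with hB | hteq
    · rcases mem_pvSelNames s hB with hs | hs | hs | hs | hs | hs | hs | hs | hs | hs | hs | hs | hs
      · rw [hs] at hL
        exact A_true l "id=" (by decide) (startswith_of_shape l "id".toList rest '=' hL _ (by decide))
      · rw [hs] at hL
        exact A_true l "name=" (by decide) (startswith_of_shape l "name".toList rest '=' hL _ (by decide))
      · rw [hs] at hL
        exact A_true l "identifier=" (by decide) (startswith_of_shape l "identifier".toList rest '=' hL _ (by decide))
      · rw [hs] at hL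
        exact A_true l "class=" (by decide) (startswith_of_shape l "class".toList rest '=' hL _ (by decide))
      · rw [hs] at hL
        exact A_true l "tag=" (by decide) (startswith_of_shape l "tag".toList rest '=' hL _ (by decide))
      · rw [hs] at hL
        exact A_true l "xpath=" (by decide) (startswith_of_shape l "xpath".toList rest '=' hL _ (by decide))
      · rw [hs] at hL
        exact A_true l "css=" (by decide) (startswith_of_shape l "css".toList rest '=' hL _ (by decide))
      · rw [hs] at hL
        exact A_true l "dom=" (by decide) (startswith_of_shape l "dom".toList rest '=' hL _ (by decide))
      · rw [hs] at hL
        exact A_true l "link=" (by decide) (startswith_of_shape l "link".toList rest '=' hL _ (by decide))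
      · rw [hs] at hL
        exact A_true l "partial link=" (by decide) (startswith_of_shape l "partial link".toList rest '=' hL _ (by decide))
      · rw [hs] at hL
        exact A_true l "data=" (by decide) (startswith_of_shape l "data".toList rest '=' hL _ (by decide))
      · rw [hs] at hL
        exact A_true l "jquery=" (by decide) (startswith_of_shape l "jquery".toList rest '=' hL _ (by decide))
      · rw [hs] at hL
        exact A_true l "default=" (by decide) (startswith_of_shape l "default".toList rest '=' hL _ (by decide))
    · have hs := eq_of_beq hteq
      rw [hs] at hL
      exact A_true l "text=" (by decide) (startswith_of_shape l "text".toList rest '=' hL _ (by decide))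

lemma main_iff (l : String) :
    has_explicit_strategy_py l = has_explicit_strategy_py_alt l := by
  cases hB : has_explicit_strategy_py_alt l with
  | true => exact BtoA l hB
  | false =>
    cases hA : has_explicit_strategy_py l with
    | false => rfl
    | true =>
      have h := AtoB l hA
      rw [hB] at h
      exact h.symm

-- ===== VERDICT (by name: the statement is the Claim_ definition above) =====
theorem has_explicit_strategy_py_spec : Claim_equal_has_explicit_strategy_py := by
  intro l _
  unfold Spec_has_explicit_strategy_py
  exact (main_iff l)
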